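-- pv_equiv track=rewrite | github.com/rebelesbb/University-Projects | Year I/First Semester/FP/lab_3/main.py | determine_longest_sequence_equal_elements
-- ===== SOURCE A (Python) =====
-- def determine_longest_sequence_equal_elements(list):
--     """
--     Determines the longest sequence of consecutive elements,
--     all of which are equal
--     :parameter list: the list of elements
--     :type list: list
--     :return : the longest sequence of equal elements
--     :rtype: list
--     """
--     list_length = len(list)
--
--     # the indices of the first and last element of the longest sequence found in the list
--     longest_sequence_start = longest_sequence_end = 0
--
--     for current_sequence_start in range(list_length) :
--
--         current_sequence_end = current_sequence_start + 1
--
--         while current_sequence_end < list_length and list[current_sequence_start] == list[current_sequence_end] :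
--             current_sequence_end += 1
--
--         current_sequence_end -= 1
--
--         if longest_sequence_end - longest_sequence_start + 1 < current_sequence_end - current_sequence_start + 1 :
--             longest_sequence_end = current_sequence_end
--             longest_sequence_start = current_sequence_start
--
--         current_sequence_start = current_sequence_end + 1
--
--     if longest_sequence_end - longest_sequence_start + 1 < current_sequence_end - current_sequence_start + 1 :
--         longest_sequence_end = current_sequence_end
--         longest_sequence_start = current_sequence_start
--
--     return list[longest_sequence_start:longest_sequence_end+1]
-- ===== SOURCE B (Python) =====
-- def determine_longest_sequence_equal_elements(list):
--     """Longest run of consecutive equal elements, single linear pass."""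
--     best_start = best_len = 0
--     cur_start = cur_len = 0
--     prev = None
--     for i, x in enumerate(list):
--         if cur_len > 0 and x == prev:
--             cur_len += 1
--         else:
--             cur_start = i
--             cur_len = 1
--         prev = x
--         if cur_len > best_len:
--             best_start = cur_start
--             best_len = cur_len
--     return list[best_start:best_start + best_len]
-- ===== Notes on version B (the rewrite author's own statement) =====
-- stated objective: faster
-- what changed: replaced the quadratic rescan-from-every-index (outer for over all start indices with an inner while re-walking each run) by a single linear pass that tracks the current run's start/length and the best run seen so far
import Mathlib
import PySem

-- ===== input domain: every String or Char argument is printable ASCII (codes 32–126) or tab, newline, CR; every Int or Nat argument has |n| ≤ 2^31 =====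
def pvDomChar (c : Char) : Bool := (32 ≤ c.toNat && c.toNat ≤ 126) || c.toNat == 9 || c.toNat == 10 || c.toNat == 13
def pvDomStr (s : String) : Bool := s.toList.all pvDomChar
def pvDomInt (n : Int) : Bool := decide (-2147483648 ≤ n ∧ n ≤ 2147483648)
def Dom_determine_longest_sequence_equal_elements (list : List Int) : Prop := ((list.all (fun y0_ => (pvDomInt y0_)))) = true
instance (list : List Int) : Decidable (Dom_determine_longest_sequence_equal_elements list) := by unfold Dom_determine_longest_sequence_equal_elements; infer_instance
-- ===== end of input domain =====

-- B replaces A's quadratic rescan-from-every-start by one linear pass tracking the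
-- current and best run (objective: faster, asymptotic).

-- ===== PORT A =====
-- the inner 'while current_sequence_end < list_length and list[cs] == list[ce]' loop (fuel = len(list) suffices)
def pvScanA (xs : List Int) (cs n : Int) : Nat → Int → Int
  | 0, ce => ce
  | fuel+1, ce =>
    if ce < n ∧ PySem.List.pyGet? xs cs = PySem.List.pyGet? xs ce then
      pvScanA xs cs n fuel (ce + 1)
    else ce

-- one iteration of A's for-loop; state = (longest_start, longest_end, current_start, current_end)
def pvStepA (xs : List Int) (n : Int) (s : Int × Int × Int × Int) (i : Int) : Int × Int × Int × Int :=
  let ce := pvScanA xs i n xs.length (i + 1) - 1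
  if s.2.1 - s.1 + 1 < ce - i + 1 then (i, ce, ce + 1, ce)
  else (s.1, s.2.1, ce + 1, ce)

def determine_longest_sequence_equal_elements (list : List Int) : List Int :=
  let n : Int := (list.length : Int)
  let s := (PySem.List.pyRange 0 n 1).foldl (pvStepA list n) (0, 0, 0, 0)
  let p := if s.2.1 - s.1 + 1 < s.2.2.2 - s.2.2.1 + 1 then (s.2.2.1, s.2.2.2) else (s.1, s.2.1)
  PySem.List.slice list (some p.1) (some (p.2 + 1))

-- ===== PORT B =====
-- one iteration of B's for-loop; state = (best_start, best_len, cur_start, cur_len, prev)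
def pvStepB (s : Int × Int × Int × Int × Option Int) (p : Int × Int) : Int × Int × Int × Int × Option Int :=
  let c := if 0 < s.2.2.2.1 ∧ some p.2 = s.2.2.2.2 then (s.2.2.1, s.2.2.2.1 + 1) else (p.1, (1 : Int))
  let b := if s.2.1 < c.2 then c else (s.1, s.2.1)
  (b.1, b.2, c.1, c.2, some p.2)

def determine_longest_sequence_equal_elements_alt (list : List Int) : List Int :=
  let s := (PySem.List.enumerate list).foldl pvStepB (0, 0, 0, 0, none)
  PySem.List.slice list (some s.1) (some (s.1 + s.2.1))

-- ===== PRECONDITION & SPEC =====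
-- Pre_ excludes only the empty list, on which A raises UnboundLocalError.
def Pre_determine_longest_sequence_equal_elements (list : List Int) : Prop := list ≠ []
instance (list : List Int) : Decidable (Pre_determine_longest_sequence_equal_elements list) := by unfold Pre_determine_longest_sequence_equal_elements; infer_instance
def pvWitness_determine_longest_sequence_equal_elements : List Int := [1, 1, 2]

def Spec_determine_longest_sequence_equal_elements (list : List Int) (out : List Int) : Prop := out = determine_longest_sequence_equal_elements_alt list
instance (list : List Int) (out : List Int) : Decidable (Spec_determine_longest_sequence_equal_elements list out) := by unfold Spec_determine_longest_sequence_equal_elements; infer_instance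

-- ===== CLAIM (what is proved, stated in full; the proofs are below) =====
def Claim_equal_determine_longest_sequence_equal_elements : Prop := ∀ (list : List Int), Dom_determine_longest_sequence_equal_elements list → Pre_determine_longest_sequence_equal_elements list → Spec_determine_longest_sequence_equal_elements list (determine_longest_sequence_equal_elements list)

-- ===== LEMMAS AND PROOFS =====

-- length of the run of elements equal to xs[i] starting at index i (as A's inner while measures it)
def pvRun (xs : List Int) (i : Nat) : Nat :=
  1 + ((xs.drop (i + 1)).takeWhile (fun e => xs[i]? == some e)).length

-- Nat-level version of one outer iteration of A
def pvStepN (xs : List Int) (b : Nat × Nat) (i : Nat) : Nat × Nat :=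
  if b.2 < pvRun xs i then (i, pvRun xs i) else b

-- run-by-run reference computation of (best_start, best_len)
def pvBestGo : List Int → Nat → Nat × Nat → Nat × Nat
  | [], _, b => b
  | y :: t, pos, b =>
    let r := 1 + (t.takeWhile (fun e => y == e)).length
    pvBestGo (t.drop (r - 1)) (pos + r) (if b.2 < r then (pos, r) else b)
  termination_by ys => ys.length
  decreasing_by simp

-- B's best pair as a function of Nat data (cast of a Nat pair)
def pvB (bs bl pos j : Nat) : Int × Int :=
  let q := if bl < j then (pos, j) else (bs, bl)
  ((q.1 : Int), (q.2 : Int))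

lemma pvRun_pos (xs : List Int) (i : Nat) : 1 ≤ pvRun xs i := by
  simp [pvRun]

lemma pvStepN_pos (xs : List Int) (b : Nat × Nat) (i : Nat) (hb : 1 ≤ b.2) :
    1 ≤ (pvStepN xs b i).2 := by
  unfold pvStepN; split
  · exact pvRun_pos xs i
  · exact hb

-- run decomposition: t = replicate L y ++ rest, and rest does not start with y
lemma run_decomp (y : Int) (t : List Int) :
    t = List.replicate ((t.takeWhile (fun e => y == e)).length) y
          ++ t.drop ((t.takeWhile (fun e => y == e)).length)
    ∧ ∀ z, (t.drop ((t.takeWhile (fun e => y == e)).length)).head? = some z → z ≠ y := by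
  induction t with
  | nil => simp
  | cons a t ih =>
    by_cases h : y = a
    · subst h
      rcases ih with ⟨h1, h2⟩
      constructor
      · simpa [List.takeWhile_cons, List.replicate_succ] using h1
      · simpa [List.takeWhile_cons] using h2
    · have hb : (y == a) = false := by simp [h]
      refine ⟨by simp [List.takeWhile_cons, hb], ?_⟩
      intro z hz
      simp [List.takeWhile_cons, hb] at hz
      subst hz
      exact fun e => h e.symm

lemma takeWhile_rep (y : Int) (m : Nat) (t' : List Int)
    (hb : ∀ z, t'.head? = some z → z ≠ y) :
    (List.replicate m y ++ t').takeWhile (fun e => y == e) = List.replicate m y := by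
  induction m with
  | zero =>
    cases t' with
    | nil => simp
    | cons z t'' =>
      have : z ≠ y := hb z (by simp)
      have hz : (y == z) = false := by simp; exact fun e => this e.symm
      simp [List.takeWhile_cons, hz]
  | succ m ih => simp [List.replicate_succ, List.takeWhile_cons, ih]

lemma pvScanA_spec (xs : List Int) (cs : Int) :
    ∀ (fuel k : Nat), xs.length ≤ k + fuel →
      pvScanA xs cs (xs.length : Int) fuel (k : Int)
        = (k : Int) + ((xs.drop k).takeWhile (fun e => PySem.List.pyGet? xs cs == some e)).length := by
  intro fuel
  induction fuel with
  | zero =>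
    intro k hk
    have hd : xs.drop k = [] := List.drop_eq_nil_of_le (by omega)
    simp [pvScanA, hd]
  | succ fuel ih =>
    intro k hk
    by_cases hkn : k < xs.length
    · have hget : PySem.List.pyGet? xs (k : Int) = some xs[k] := by
        simp [PySem.List.pyGet?_natCast, List.getElem?_eq_getElem hkn]
      have hdrop : xs.drop k = xs[k] :: xs.drop (k + 1) := List.drop_eq_getElem_cons hkn
      by_cases heq : PySem.List.pyGet? xs cs = some xs[k]
      · have hcond : ((k : Int) < (xs.length : Int) ∧ PySem.List.pyGet? xs cs = PySem.List.pyGet? xs (k : Int)) := by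
          exact ⟨by exact_mod_cast hkn, by rw [hget]; exact heq⟩
        rw [pvScanA, if_pos hcond]
        have h1 : (k : Int) + 1 = ((k + 1 : Nat) : Int) := by push_cast; ring
        rw [h1, ih (k + 1) (by omega)]
        have hTW : (xs.drop k).takeWhile (fun e => PySem.List.pyGet? xs cs == some e)
            = xs[k] :: (xs.drop (k + 1)).takeWhile (fun e => PySem.List.pyGet? xs cs == some e) := by
          rw [hdrop, List.takeWhile_cons]
          simp [heq]
        rw [hTW]
        simp only [List.length_cons]
        push_cast; ring
      · have hcond : ¬ ((k : Int) < (xs.length : Int) ∧ PySem.List.pyGet? xs cs = PySem.List.pyGet? xs (k : Int)) := by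
          rw [hget]; exact fun h => heq h.2
        rw [pvScanA, if_neg hcond]
        have hTW : (xs.drop k).takeWhile (fun e => PySem.List.pyGet? xs cs == some e) = [] := by
          rw [hdrop, List.takeWhile_cons]
          simp [heq]
        rw [hTW]
        simp
    · have hd : xs.drop k = [] := List.drop_eq_nil_of_le (by omega)
      have hcond : ¬ ((k : Int) < (xs.length : Int) ∧ PySem.List.pyGet? xs cs = PySem.List.pyGet? xs (k : Int)) := by
        exact fun h => hkn (by exact_mod_cast h.1)
      rw [pvScanA, if_neg hcond]
      simp [hd]

lemma pvStepA_cast (xs : List Int) (i b1 b2 : Nat) (hi : i < xs.length) (c1 c2 : Int) :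
    pvStepA xs (xs.length : Int) ((b1 : Int), (b1 : Int) + (b2 : Int) - 1, c1, c2) (i : Int)
      = (((pvStepN xs (b1, b2) i).1 : Int),
         ((pvStepN xs (b1, b2) i).1 : Int) + ((pvStepN xs (b1, b2) i).2 : Int) - 1,
         ((i + pvRun xs i : Nat) : Int), ((i + pvRun xs i : Nat) : Int) - 1) := by
  have hscan : pvScanA xs (i : Int) (xs.length : Int) xs.length ((i : Int) + 1)
      = ((i + pvRun xs i : Nat) : Int) := by
    have h1 : ((i : Int) + 1) = ((i + 1 : Nat) : Int) := by push_cast; ring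
    rw [h1, pvScanA_spec xs (i : Int) xs.length (i + 1) (by omega)]
    have h2 : PySem.List.pyGet? xs (i : Int) = xs[i]? := PySem.List.pyGet?_natCast xs i
    rw [h2]
    simp [pvRun]
    push_cast; ring
  unfold pvStepA
  rw [hscan]
  unfold pvStepN
  by_cases h : b2 < pvRun xs i
  · rw [if_pos (by push_cast; omega), if_pos h]
    simp only [Prod.mk.injEq]
    and_intros <;> first | trivial | (push_cast; omega)
  · rw [if_neg (by push_cast; omega), if_neg h]
    simp only [Prod.mk.injEq]
    and_intros <;> first | trivial | (push_cast; omega)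

lemma foldA (xs : List Int) :
    ∀ (l : List Nat) (b1 b2 : Nat) (c1 c2 : Int),
      (∀ i ∈ l, i < xs.length) → 1 ≤ b2 →
      (l.map (fun (i : Nat) => (i : Int))).foldl (pvStepA xs (xs.length : Int))
          ((b1 : Int), (b1 : Int) + (b2 : Int) - 1, c1, c2)
        = (((l.foldl (pvStepN xs) (b1, b2)).1 : Int),
           ((l.foldl (pvStepN xs) (b1, b2)).1 : Int) + ((l.foldl (pvStepN xs) (b1, b2)).2 : Int) - 1,
           (match l.getLast? with
            | none => (c1, c2)
            | some i => (((i + pvRun xs i : Nat) : Int), ((i + pvRun xs i : Nat) : Int) - 1) : Int × Int)) := by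
  intro l
  induction l with
  | nil => intro b1 b2 c1 c2 _ _; simp
  | cons i t ih =>
    intro b1 b2 c1 c2 hmem hb
    have hi : i < xs.length := hmem i (by simp)
    rw [List.map_cons, List.foldl_cons, pvStepA_cast xs i b1 b2 hi c1 c2]
    rw [ih (pvStepN xs (b1, b2) i).1 (pvStepN xs (b1, b2) i).2
        _ _ (fun j hj => hmem j (by simp [hj])) (pvStepN_pos xs (b1, b2) i hb)]
    cases t with
    | nil => simp
    | cons a t' =>
      cases h : (a :: t').getLast? with
      | none => simp at h
      | some z => simp [h]

lemma A_eq (xs : List Int) (hne : xs ≠ []) :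
    determine_longest_sequence_equal_elements xs
      = PySem.List.slice xs (some (((List.range xs.length).foldl (pvStepN xs) (0, 1)).1 : Int))
          (some ((((List.range xs.length).foldl (pvStepN xs) (0, 1)).1 : Int)
                 + (((List.range xs.length).foldl (pvStepN xs) (0, 1)).2 : Int))) := by
  have hlen : 0 < xs.length := List.length_pos_of_ne_nil hne
  obtain ⟨m, hm⟩ : ∃ m, (List.range xs.length).getLast? = some m := by
    cases h : (List.range xs.length).getLast? with
    | none =>
      exfalso
      rw [List.getLast?_eq_none_iff] at h
      have := List.length_range (n := xs.length)
      rw [h] at this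
      simp at this
      omega
    | some z => exact ⟨z, rfl⟩
  simp only [determine_longest_sequence_equal_elements]
  have hmap : PySem.List.pyRange 0 (xs.length : Int) 1
      = (List.range xs.length).map (fun (i : Nat) => (i : Int)) := by
    rw [PySem.List.pyRange_one]; simp
  rw [hmap,
      show ((0 : Int), (0 : Int), (0 : Int), (0 : Int))
        = (((0 : Nat) : Int), ((0 : Nat) : Int) + ((1 : Nat) : Int) - 1, (0 : Int), (0 : Int)) by norm_num,
      foldA xs (List.range xs.length) 0 1 0 0 (fun i hi => List.mem_range.mp hi) (le_refl 1), hm]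
  simp only []
  rw [if_neg (by push_cast; omega)]
  congr 2
  push_cast; ring

lemma foldl_stepN_noop (xs : List Int) :
    ∀ (l : List Nat) (b : Nat × Nat), (∀ i ∈ l, pvRun xs i ≤ b.2) →
      l.foldl (pvStepN xs) b = b := by
  intro l
  induction l with
  | nil => intro b _; rfl
  | cons i t ih =>
    intro b h
    have h1 : pvStepN xs b i = b := by
      unfold pvStepN
      rw [if_neg (by have := h i (by simp); omega)]
    rw [List.foldl_cons, h1, ih b (fun j hj => h j (by simp [hj]))]

lemma pvRun_inner (xs : List Int) (pos r : Nat) (y : Int) (t' : List Int)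
    (hdrop : xs.drop pos = List.replicate r y ++ t')
    (hb : ∀ z, t'.head? = some z → z ≠ y)
    (j : Nat) (hj : j < r) :
    pvRun xs (pos + j) = r - j := by
  have hdj : xs.drop (pos + j) = List.replicate (r - j) y ++ t' := by
    rw [← List.drop_drop, hdrop, List.drop_append_of_le_length (by simp; omega),
        List.drop_replicate]
  have hget : xs[pos + j]? = some y := by
    have h0 : (xs.drop (pos + j))[0]? = xs[pos + j]? := by
      simp [List.getElem?_drop]
    rw [← h0, hdj, List.getElem?_append_left (by simp; omega)]
    simp [List.getElem?_replicate]
    omega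
  have hdj1 : xs.drop (pos + j + 1) = List.replicate (r - j - 1) y ++ t' := by
    rw [← List.drop_drop, hdj, List.drop_append_of_le_length (by simp; omega),
        List.drop_replicate]
  unfold pvRun
  rw [hdj1, hget]
  have hpred : (fun e => (some y == some e)) = (fun e => y == e) := by
    funext e; simp [Option.some_beq_some]
  rw [hpred, takeWhile_rep y (r - j - 1) t' hb]
  simp
  omega

lemma foldN_go (xs : List Int) :
    ∀ (ys : List Int) (pos : Nat) (b : Nat × Nat), xs.drop pos = ys → 1 ≤ b.2 →
      (List.range' pos ys.length).foldl (pvStepN xs) b = pvBestGo ys pos b := by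
  intro ys pos b
  induction ys, pos, b using pvBestGo.induct with
  | case1 pos b => intro _ _; simp [pvBestGo]
  | case2 y t pos b r ih =>
    intro hdrop hb
    obtain ⟨hrep, hbound⟩ := run_decomp y t
    set L := (t.takeWhile (fun e => y == e)).length with hL
    set t' := t.drop L with ht'
    have hlt : t.length = L + t'.length := by
      conv_lhs => rw [hrep]
      simp
    have hdropfull : xs.drop pos = List.replicate (1 + L) y ++ t' := by
      rw [hdrop]
      conv_lhs => rw [hrep]
      rw [List.replicate_add]
      simp
    have hrun0 : pvRun xs pos = 1 + L := by
      unfold pvRun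
      have h1 : xs.drop (pos + 1) = t := by
        rw [← List.drop_drop, hdrop]
        simp
      have h2 : xs[pos]? = some y := by
        have h0 : (xs.drop pos)[0]? = xs[pos]? := by simp [List.getElem?_drop]
        rw [← h0, hdrop]
        simp
      rw [h1, h2]
      have hpred : (fun e => ((some y : Option Int) == some e)) = (fun e => y == e) := by
        funext e; simp [Option.some_beq_some]
      rw [hpred]
    have hstep0 : pvStepN xs b pos = (if b.2 < 1 + L then (pos, 1 + L) else b) := by
      unfold pvStepN; rw [hrun0]
    have hb' : 1 ≤ (if b.2 < 1 + L then (pos, 1 + L) else b).2 := by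
      split
      · exact Nat.le_add_right 1 L
      · exact hb
    have hlen2 : (y :: t).length = (L + t'.length) + 1 := by
      rw [List.length_cons, hlt]
    have hsplit : List.range' pos (y :: t).length
        = pos :: (List.range' (pos + 1) L ++ List.range' (pos + 1 + L) t'.length) := by
      rw [hlen2, List.range'_succ]
      congr 1
      symm
      simpa using List.range'_append (pos + 1) L t'.length 1
    have hnoop : ∀ i ∈ List.range' (pos + 1) L,
        pvRun xs i ≤ (if b.2 < 1 + L then (pos, 1 + L) else b).2 := by
      intro i hi
      rw [List.mem_range'] at hi
      obtain ⟨j, hjL, hij⟩ := hi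
      have hij' : i = pos + (1 + j) := by omega
      subst hij'
      rw [pvRun_inner xs pos (1 + L) y t' hdropfull hbound (1 + j) (by omega)]
      split
      · omega
      · omega
    have hdropr : xs.drop (pos + (1 + L)) = t' := by
      rw [← List.drop_drop, hdropfull, List.drop_append_of_le_length (by simp),
          List.drop_replicate]
      simp
    have htd : t.drop (1 + L - 1) = t' := by
      rw [show 1 + L - 1 = L by omega]
    rw [hsplit, List.foldl_cons, List.foldl_append, hstep0,
        foldl_stepN_noop xs (List.range' (pos + 1) L) _ hnoop]
    simp only [pvBestGo]
    rw [htd]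
    rw [show pos + 1 + L = pos + (1 + L) by omega]
    have hreq : r = 1 + L := rfl
    rw [hreq, show 1 + L - 1 = L by omega, ← ht'] at ih
    simp only [dite_eq_ite] at ih
    exact ih hdropr hb'

lemma foldB_run (y : Int) :
    ∀ (k : Nat) (pos j bs bl : Nat), 1 ≤ j →
      (PySem.List.enumerate (List.replicate k y) ((pos + j : Nat) : Int)).foldl pvStepB
          ((pvB bs bl pos j).1, (pvB bs bl pos j).2, (pos : Int), (j : Int), some y)
        = ((pvB bs bl pos (j + k)).1, (pvB bs bl pos (j + k)).2,
           (pos : Int), ((j + k : Nat) : Int), some y) := by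
  intro k
  induction k with
  | zero => intro pos j bs bl hj; simp [PySem.List.enumerate_nil]
  | succ k ih =>
    intro pos j bs bl hj
    rw [List.replicate_succ, PySem.List.enumerate_cons, List.foldl_cons]
    have hstep : pvStepB ((pvB bs bl pos j).1, (pvB bs bl pos j).2, (pos : Int), (j : Int), some y)
          (((pos + j : Nat) : Int), y)
        = ((pvB bs bl pos (j + 1)).1, (pvB bs bl pos (j + 1)).2,
           (pos : Int), ((j + 1 : Nat) : Int), some y) := by
      rcases Nat.lt_or_ge bl j with h1 | h1
      · have e1 : pvB bs bl pos j = ((pos : Int), (j : Int)) := by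
          unfold pvB; rw [if_pos h1]
        have e2 : pvB bs bl pos (j + 1) = ((pos : Int), ((j + 1 : Nat) : Int)) := by
          unfold pvB; rw [if_pos (by omega)]
        rw [e1, e2]
        unfold pvStepB
        dsimp only
        rw [if_pos (show (0:Int) < (j : Int) ∧ some y = some y from ⟨by exact_mod_cast hj, rfl⟩), if_pos (by push_cast; omega)]
        simp only [Prod.mk.injEq]
        and_intros <;> first | trivial | (push_cast; omega)
      · have e1 : pvB bs bl pos j = ((bs : Int), (bl : Int)) := by
          unfold pvB; rw [if_neg (by omega)]
        rw [e1]
        unfold pvStepB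
        dsimp only
        rw [if_pos (show (0:Int) < (j : Int) ∧ some y = some y from ⟨by exact_mod_cast hj, rfl⟩)]
        rcases Nat.lt_or_ge bl (j + 1) with h2 | h2
        · have e2 : pvB bs bl pos (j + 1) = ((pos : Int), ((j + 1 : Nat) : Int)) := by
            unfold pvB; rw [if_pos h2]
          rw [e2, if_pos (by push_cast; omega)]
          simp only [Prod.mk.injEq]
          and_intros <;> first | trivial | (push_cast; omega)
        · have e2 : pvB bs bl pos (j + 1) = ((bs : Int), (bl : Int)) := by
            unfold pvB; rw [if_neg (by omega)]
          rw [e2, if_neg (by push_cast; omega)]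
          simp only [Prod.mk.injEq]
          and_intros <;> first | trivial | (push_cast; omega)
    rw [hstep,
        show ((pos + j : Nat) : Int) + 1 = ((pos + (j + 1) : Nat) : Int) by push_cast; ring,
        ih pos (j + 1) bs bl (by omega),
        show (j + 1) + k = j + (k + 1) by omega]

lemma foldB_go :
    ∀ (ys : List Int) (pos : Nat) (b : Nat × Nat) (cs cl : Int) (prev : Option Int),
      (∀ z t, ys = z :: t → ¬ (0 < cl ∧ some z = prev)) →
      ∃ c : Int × Int × Option Int,
        (PySem.List.enumerate ys (pos : Int)).foldl pvStepB ((b.1 : Int), (b.2 : Int), cs, cl, prev)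
          = (((pvBestGo ys pos b).1 : Int), ((pvBestGo ys pos b).2 : Int), c) := by
  intro ys pos b
  induction ys, pos, b using pvBestGo.induct with
  | case1 pos b =>
    intro cs cl prev _
    exact ⟨(cs, cl, prev), by simp [pvBestGo, PySem.List.enumerate_nil]⟩
  | case2 y t pos b r ih =>
    intro cs cl prev hfresh
    obtain ⟨hrep, hbound⟩ := run_decomp y t
    set L := (t.takeWhile (fun e => y == e)).length with hL
    set t' := t.drop L with ht'
    rw [PySem.List.enumerate_cons, List.foldl_cons]
    have hstep : pvStepB ((b.1 : Int), (b.2 : Int), cs, cl, prev) ((pos : Int), y)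
        = ((pvB b.1 b.2 pos 1).1, (pvB b.1 b.2 pos 1).2, (pos : Int), ((1 : Nat) : Int), some y) := by
      unfold pvStepB
      dsimp only
      rw [if_neg (hfresh y t rfl)]
      rcases Nat.lt_or_ge b.2 1 with h1 | h1
      · have e1 : pvB b.1 b.2 pos 1 = ((pos : Int), ((1 : Nat) : Int)) := by
          unfold pvB; rw [if_pos h1]
        rw [e1, if_pos (by push_cast; omega)]
        simp only [Prod.mk.injEq]
        and_intros <;> first | trivial | (push_cast; omega)
      · have e1 : pvB b.1 b.2 pos 1 = ((b.1 : Int), (b.2 : Int)) := by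
          unfold pvB; rw [if_neg (by omega)]
        rw [e1, if_neg (by push_cast; omega)]
        simp only [Prod.mk.injEq]
        and_intros <;> first | trivial | (push_cast; omega)
    rw [hstep]
    have henum : PySem.List.enumerate t ((pos : Int) + 1)
        = PySem.List.enumerate (List.replicate L y) ((pos + 1 : Nat) : Int)
          ++ PySem.List.enumerate t' (((pos + 1 : Nat) : Int) + (List.replicate L y).length) := by
      conv_lhs => rw [hrep]
      rw [PySem.List.enumerate_append]
      norm_cast
    rw [henum, List.foldl_append, foldB_run y L pos 1 b.1 b.2 (le_refl 1)]
    have hstart : ((pos + 1 : Nat) : Int) + ((List.replicate L y).length : Int)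
        = ((pos + (1 + L) : Nat) : Int) := by
      simp; push_cast; ring
    rw [hstart]
    have hb' : pvB b.1 b.2 pos (1 + L)
        = (((if b.2 < 1 + L then (pos, 1 + L) else b).1 : Int),
           ((if b.2 < 1 + L then (pos, 1 + L) else b).2 : Int)) := by
      unfold pvB
      split_ifs <;> rfl
    have hfresh' : ∀ z tt, t' = z :: tt → ¬ (0 < ((1 + L : Nat) : Int) ∧ some z = some y) := by
      intro z tt hz
      rintro ⟨-, hzy⟩
      exact hbound z (by rw [hz]; rfl) (by injection hzy)
    have hreq : r = 1 + L := rfl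
    rw [hreq, show 1 + L - 1 = L by omega, ← ht'] at ih
    simp only [dite_eq_ite] at ih
    rw [hb']
    obtain ⟨c, hc⟩ := ih ((pos : Int)) (((1 + L : Nat) : Int)) (some y) hfresh'
    refine ⟨c, ?_⟩
    rw [hc]
    simp only [pvBestGo, dite_eq_ite]
    rw [← hL, show 1 + L - 1 = L by omega, ← ht']

lemma bestGo_init (ys : List Int) (hne : ys ≠ []) :
    pvBestGo ys 0 (0, 0) = pvBestGo ys 0 (0, 1) := by
  cases ys with
  | nil => cases hne rfl
  | cons y t =>
    simp only [pvBestGo]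
    rw [if_pos (by omega)]
    by_cases h : 1 < 1 + (t.takeWhile (fun e => y == e)).length
    · rw [if_pos h]
    · rw [if_neg h]
      have h0 : (t.takeWhile (fun e => y == e)).length = 0 := by omega
      rw [h0]

lemma B_eq (xs : List Int) :
    determine_longest_sequence_equal_elements_alt xs
      = PySem.List.slice xs (some ((pvBestGo xs 0 (0, 0)).1 : Int))
          (some (((pvBestGo xs 0 (0, 0)).1 : Int) + ((pvBestGo xs 0 (0, 0)).2 : Int))) := by
  obtain ⟨c, hc⟩ := foldB_go xs 0 (0, 0) 0 0 none (by intro z t h; simp)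
  simp only [determine_longest_sequence_equal_elements_alt]
  rw [show (0 : Int) = ((0 : Nat) : Int) by norm_num] at hc ⊢
  rw [hc]

-- ===== VERDICT (by name: the statement is the Claim_ definition above) =====
theorem determine_longest_sequence_equal_elements_spec : Claim_equal_determine_longest_sequence_equal_elements := by
  intro list _ hpre
  unfold Spec_determine_longest_sequence_equal_elements
  rw [A_eq list hpre, B_eq list]
  have h1 : (List.range list.length).foldl (pvStepN list) (0, 1) = pvBestGo list 0 (0, 1) := by
    rw [List.range_eq_range']
    exact foldN_go list list 0 (0, 1) (by simp) (le_refl 1)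
  rw [h1, ← bestGo_init list hpre]
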